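-- pv_equiv track=rewrite | github.com/yousero/crap | python/crypto/octcode.py | octcode_encode
-- ===== SOURCE A (Python) =====
-- import math
--
-- def octcode_encode(data):
--   result = ''
--   buf = ''
--   for b in bytes(data, encoding='utf-8'):
--     s = ''.join(list(reversed(bin(b)[2:])))
--     if len(s) < 8:
--       s += '0' * (8 - len(s))
--     s = buf + s
--     buf = ''
--     for i in range(math.ceil(len(s)/3)):
--       ch = s[i*3:i*3+3]
--       if len(ch) == 3:
--         result += oct(int(ch, 2))[2:]
--       else:
--         buf = ch
--   if buf:
--     if len(buf) < 3:
--       buf += '0' * (3 - len(buf))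
--     result += oct(int(buf, 2))[2:]
--   return result
-- ===== SOURCE B (Python) =====
-- def _byte_bits(b):
--     return bin(b)[2:][::-1].ljust(8, '0')
--
-- def octcode_encode(data):
--     bits = ''.join(_byte_bits(b) for b in bytes(data, 'utf-8'))
--     out = []
--     i = 0
--     while i < len(bits):
--         out.append(oct(int(bits[i:i+3].ljust(3, '0'), 2))[2:])
--         i += 3
--     return ''.join(out)
-- ===== Notes on version B (the rewrite author's own statement) =====
-- stated objective: simpler
-- what changed: Replaced the per-byte carry buffer and nested range/slice loop by building one flat LSB-first bit string and peeling 3-bit chunks off its front, padding only the final short chunk.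
import Mathlib
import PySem

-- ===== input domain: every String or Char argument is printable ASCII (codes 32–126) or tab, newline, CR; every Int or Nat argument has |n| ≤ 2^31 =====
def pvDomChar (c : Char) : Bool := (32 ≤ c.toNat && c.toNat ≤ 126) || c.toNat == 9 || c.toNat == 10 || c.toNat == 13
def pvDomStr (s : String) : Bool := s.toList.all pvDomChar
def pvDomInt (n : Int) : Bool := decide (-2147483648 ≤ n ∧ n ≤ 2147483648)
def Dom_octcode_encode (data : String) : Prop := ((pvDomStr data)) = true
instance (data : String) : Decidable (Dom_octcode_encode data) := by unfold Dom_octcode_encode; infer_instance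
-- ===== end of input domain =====

-- B builds one flat bit string and chunks it in threes, instead of A's per-byte carry
-- buffer with a nested range/slice loop; same output, objective: simpler.

-- ===== shared helpers (exact ports of Python built-ins on the values that reach them) =====

-- bin(n)[2:] for n > 0 (MSB-first binary digits); bin(0)[2:] handled by binStr
def binStrGo (n : Nat) : List Char :=
  if h : n = 0 then []
  else binStrGo (n / 2) ++ [if n % 2 = 1 then '1' else '0']
termination_by n
decreasing_by exact Nat.div_lt_self (Nat.pos_of_ne_zero h) one_lt_two

-- bin(n)[2:]
def binStr (n : Nat) : List Char := if n = 0 then ['0'] else binStrGo n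

-- oct(n)[2:] for n > 0
def octStrGo (n : Nat) : List Char :=
  if h : n = 0 then []
  else octStrGo (n / 8) ++ [Char.ofNat (48 + n % 8)]
termination_by n
decreasing_by exact Nat.div_lt_self (Nat.pos_of_ne_zero h) (by norm_num)

-- oct(n)[2:]
def octStr (n : Nat) : List Char := if n = 0 then ['0'] else octStrGo n

-- int(s, 2); exact for strings of '0'/'1' digits, which is all that ever reaches it here
def binVal (l : List Char) : Nat := l.foldl (fun a c => 2 * a + (if c = '1' then 1 else 0)) 0

-- ===== PORT A =====

-- the inner `for i in range(math.ceil(len(s)/3))` loop body; s[i*3:i*3+3] = (s.drop (i*3)).take 3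
def innerBody (s : List Char) (st2 : List Char × List Char) (i : Nat) : List Char × List Char :=
  let ch := (s.drop (i * 3)).take 3
  if ch.length = 3 then (st2.1 ++ octStr (binVal ch), st2.2) else (st2.1, ch)

-- one iteration of A's `for b in bytes(data, 'utf-8')` loop; math.ceil(len(s)/3) = (len(s)+2)/3
def stepA (st : List Char × List Char) (b : Nat) : List Char × List Char :=
  let s0 := (binStr b).reverse
  let s1 := if s0.length < 8 then s0 ++ List.replicate (8 - s0.length) '0' else s0
  let s := st.2 ++ s1
  (List.range ((s.length + 2) / 3)).foldl (innerBody s) (st.1, [])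

-- bytes(data,'utf-8') = the char codes, exact on the ASCII domain Dom_octcode_encode
def octcode_encode (data : String) : String :=
  let st := (data.toList.map Char.toNat).foldl stepA ([], [])
  String.mk (if st.2 ≠ [] then
      st.1 ++ octStr (binVal (if st.2.length < 3 then st.2 ++ List.replicate (3 - st.2.length) '0' else st.2))
    else st.1)

-- ===== PORT B =====

-- bin(b)[2:][::-1].ljust(8, '0')
def byteBits (b : Nat) : List Char :=
  let s := (binStr b).reverse
  s ++ List.replicate (8 - s.length) '0'

-- the `while i < len(bits):` loop: bits[i:i+3].ljust(3,'0'), then i += 3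
def encodeFrom (bits : List Char) (i : Nat) : List Char :=
  if h : i < bits.length then
    let ch := (bits.drop i).take 3
    octStr (binVal (ch ++ List.replicate (3 - ch.length) '0')) ++ encodeFrom bits (i + 3)
  else []
termination_by bits.length - i
decreasing_by omega

def octcode_encode_alt (data : String) : String :=
  String.mk (encodeFrom ((data.toList.map Char.toNat).flatMap byteBits) 0)

-- ===== PRECONDITION & SPEC =====
def Spec_octcode_encode (data : String) (out : String) : Prop := out = octcode_encode_alt data
instance (data : String) (out : String) : Decidable (Spec_octcode_encode data out) := by unfold Spec_octcode_encode; infer_instance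

-- ===== CLAIM (what is proved, stated in full; the proofs are below) =====
def Claim_equal_octcode_encode : Prop := ∀ (data : String), Dom_octcode_encode data → Spec_octcode_encode data (octcode_encode data)

-- ===== LEMMAS AND PROOFS =====

-- ce l: the octal digits of all complete 3-bit groups of l; lv l: the leftover (< 3 bits)
def ce (l : List Char) : List Char :=
  if 3 ≤ l.length then octStr (binVal (l.take 3)) ++ ce (l.drop 3) else []
termination_by l.length
decreasing_by simp only [List.length_drop]; omega

def lv (l : List Char) : List Char :=
  if 3 ≤ l.length then lv (l.drop 3) else l
termination_by l.length
decreasing_by simp only [List.length_drop]; omega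

lemma ce_big {l : List Char} (h : 3 ≤ l.length) :
    ce l = octStr (binVal (l.take 3)) ++ ce (l.drop 3) := by
  conv_lhs => rw [ce]
  rw [if_pos h]

lemma ce_small {l : List Char} (h : ¬ 3 ≤ l.length) : ce l = [] := by
  conv_lhs => rw [ce]
  rw [if_neg h]

lemma lv_big {l : List Char} (h : 3 ≤ l.length) : lv l = lv (l.drop 3) := by
  conv_lhs => rw [lv]
  rw [if_pos h]

lemma lv_small {l : List Char} (h : ¬ 3 ≤ l.length) : lv l = l := by
  conv_lhs => rw [lv]
  rw [if_neg h]

lemma lv_length (l : List Char) : (lv l).length < 3 := by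
  by_cases h : 3 ≤ l.length
  · rw [lv_big h]
    exact lv_length (l.drop 3)
  · rw [lv_small h]
    omega
termination_by l.length
decreasing_by simp only [List.length_drop]; omega

lemma take_append_of_big {x : List Char} (y : List Char) (h : 3 ≤ x.length) :
    (x ++ y).take 3 = x.take 3 := by
  rw [List.take_append]
  have h0 : 3 - x.length = 0 := by omega
  simp [h0]

lemma drop_append_of_big {x : List Char} (y : List Char) (h : 3 ≤ x.length) :
    (x ++ y).drop 3 = x.drop 3 ++ y := by
  rw [List.drop_append]
  have h0 : 3 - x.length = 0 := by omega
  simp [h0]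

lemma ce_append (x y : List Char) : ce (x ++ y) = ce x ++ ce (lv x ++ y) := by
  by_cases h : 3 ≤ x.length
  · rw [ce_big (l := x ++ y) (by simp; omega), take_append_of_big y h, drop_append_of_big y h,
      ce_append (x.drop 3) y, ce_big h, lv_big h, List.append_assoc]
  · rw [ce_small h, lv_small h, List.nil_append]
termination_by x.length
decreasing_by simp only [List.length_drop]; omega

lemma lv_append (x y : List Char) : lv (x ++ y) = lv (lv x ++ y) := by
  by_cases h : 3 ≤ x.length
  · rw [lv_big (l := x ++ y) (by simp; omega), drop_append_of_big y h,
      lv_append (x.drop 3) y, lv_big h]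
  · rw [lv_small h]
termination_by x.length
decreasing_by simp only [List.length_drop]; omega

-- A's inner range loop over s computes the complete-group digits and the leftover of s
lemma inner_loop_eq (s r : List Char) :
    (List.range ((s.length + 2) / 3)).foldl (innerBody s) (r, []) = (r ++ ce s, lv s) := by
  by_cases h : 3 ≤ s.length
  · have hn : (s.length + 2) / 3 = ((s.drop 3).length + 2) / 3 + 1 := by
      simp only [List.length_drop]; omega
    rw [hn, List.range_succ_eq_map, List.foldl_cons, List.foldl_map]
    have h0 : innerBody s (r, []) 0 = (r ++ octStr (binVal (s.take 3)), []) := by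
      unfold innerBody
      simp
      omega
    have hbody : (fun (st2 : List Char × List Char) i => innerBody s st2 (i + 1))
        = innerBody (s.drop 3) := by
      funext st2 i
      simp only [innerBody, List.drop_drop]
      have e : (i + 1) * 3 = 3 + i * 3 := by ring
      rw [e]
    rw [h0, hbody, inner_loop_eq (s.drop 3) (r ++ octStr (binVal (s.take 3))),
      ce_big h, lv_big h, List.append_assoc]
  · by_cases h0 : s = []
    · subst h0
      simp [ce_small (l := []) (by simp), lv_small (l := []) (by simp)]
    · have hpos := List.length_pos_of_ne_nil h0
      have hn : (s.length + 2) / 3 = 1 := by omega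
      rw [hn, show List.range 1 = [0] from rfl, List.foldl_cons, List.foldl_nil]
      simp only [innerBody, Nat.zero_mul, List.drop_zero]
      rw [List.take_of_length_le (by omega)]
      rw [if_neg (by omega), ce_small h, lv_small h, List.append_nil]
termination_by s.length
decreasing_by simp only [List.length_drop]; omega

lemma stepA_eq (st : List Char × List Char) (b : Nat) :
    stepA st b = (st.1 ++ ce (st.2 ++ byteBits b), lv (st.2 ++ byteBits b)) := by
  unfold stepA byteBits
  have hpad : ∀ s0 : List Char,
      (if s0.length < 8 then s0 ++ List.replicate (8 - s0.length) '0' else s0)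
        = s0 ++ List.replicate (8 - s0.length) '0' := by
    intro s0
    split
    · rfl
    · have h0 : 8 - s0.length = 0 := by omega
      simp [h0]
  simp only []
  rw [hpad]
  exact inner_loop_eq _ _

lemma fold_stepA (bs : List Nat) (r buf : List Char) (hbuf : buf.length < 3) :
    bs.foldl stepA (r, buf)
      = (r ++ ce (buf ++ bs.flatMap byteBits), lv (buf ++ bs.flatMap byteBits)) := by
  induction bs generalizing r buf with
  | nil => simp [ce_small (l := buf) (by omega), lv_small (l := buf) (by omega)]
  | cons b bs ih =>
    rw [List.foldl_cons, stepA_eq, ih _ _ (lv_length _), List.flatMap_cons, ← List.append_assoc,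
      ce_append (buf ++ byteBits b) (bs.flatMap byteBits),
      lv_append (buf ++ byteBits b) (bs.flatMap byteBits), List.append_assoc]

lemma encodeFrom_eq (bits : List Char) (i : Nat) :
    encodeFrom bits i = ce (bits.drop i) ++ (if lv (bits.drop i) = [] then []
      else octStr (binVal (lv (bits.drop i)
        ++ List.replicate (3 - (lv (bits.drop i)).length) '0'))) := by
  by_cases h : i < bits.length
  · rw [encodeFrom, dif_pos h]
    have hd3 : List.drop 3 (bits.drop i) = bits.drop (i + 3) := by
      rw [List.drop_drop]
    by_cases h3 : 3 ≤ (bits.drop i).length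
    · have ht : ((bits.drop i).take 3).length = 3 := by
        have h3' := h3
        rw [List.length_drop] at h3'
        rw [List.length_take, List.length_drop]
        omega
      simp only [ht]
      rw [encodeFrom_eq bits (i + 3), ce_big h3, lv_big h3, hd3]
      simp [List.append_assoc]
    · have hlen : (bits.drop i).length < 3 := by omega
      have hne : bits.drop i ≠ [] := by
        intro he
        have := congrArg List.length he
        simp at this
        omega
      rw [List.take_of_length_le (by omega)]
      rw [encodeFrom, dif_neg (by have h2 := hlen; simp only [List.length_drop] at h2; omega)]
      rw [ce_small h3, lv_small h3, if_neg hne, List.append_nil, List.nil_append]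
  · rw [encodeFrom, dif_neg h, List.drop_eq_nil_of_le (by omega)]
    rw [ce_small (by simp), lv_small (by simp)]
    simp
termination_by bits.length - i
decreasing_by omega

-- ===== VERDICT (by name: the statement is the Claim_ definition above) =====
theorem octcode_encode_spec : Claim_equal_octcode_encode := by
  intro data _
  unfold Spec_octcode_encode octcode_encode octcode_encode_alt
  rw [fold_stepA _ _ _ (by simp), encodeFrom_eq, List.drop_zero]
  set L := (data.toList.map Char.toNat).flatMap byteBits
  simp only [List.nil_append]
  have hlt := lv_length L
  by_cases h : lv L = []
  · simp [h]
  · simp [h, if_pos hlt]
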